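-- pv_equiv track=rewrite | github.com/Lumos-Labs-HQ/Astraapi | fastapi/routing.py | _extract_boundary
-- ===== SOURCE A (Python) =====
-- from typing import (
--     Annotated,
--     Any,
--     Callable,
--     Optional,
--     TypeVar,
--     Union,
-- )
--
-- def _extract_boundary(content_type: str) -> Optional[str]:
--     """Extract the boundary parameter from a multipart Content-Type header."""
--     for part in content_type.split(";"):
--         part = part.strip()
--         if part.lower().startswith("boundary="):
--             value = part[9:]
--             # Strip surrounding quotes if present
--             if len(value) >= 2 and value[0] == '"' and value[-1] == '"':
--                 value = value[1:-1]
--             return value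
--     return None
-- ===== SOURCE B (Python) =====
-- def _extract_boundary(content_type):
--     """Extract the boundary parameter from a multipart Content-Type header."""
--     params = {}
--     for part in content_type.split(";"):
--         part = part.strip()
--         i = part.find("=")
--         if i == -1:
--             continue
--         key = part[:i].lower()
--         if key not in params:
--             params[key] = part[i + 1:]
--     value = params.get("boundary")
--     if value is not None and len(value) >= 2 and value[0] == '"' and value[-1] == '"':
--         value = value[1:-1]
--     return value
-- ===== Notes on version B (the rewrite author's own statement) =====
-- stated objective: alternative
-- what changed: A scans the semicolon-separated parts and early-returns on the first part whose lowercased form starts with the boundary-key prefix; B instead parses every part into a first-occurrence-wins dict of lowercased parameter keys (splitting at the first equals sign) and then does a single lookup of the boundary key followed by quote stripping.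
import Mathlib
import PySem

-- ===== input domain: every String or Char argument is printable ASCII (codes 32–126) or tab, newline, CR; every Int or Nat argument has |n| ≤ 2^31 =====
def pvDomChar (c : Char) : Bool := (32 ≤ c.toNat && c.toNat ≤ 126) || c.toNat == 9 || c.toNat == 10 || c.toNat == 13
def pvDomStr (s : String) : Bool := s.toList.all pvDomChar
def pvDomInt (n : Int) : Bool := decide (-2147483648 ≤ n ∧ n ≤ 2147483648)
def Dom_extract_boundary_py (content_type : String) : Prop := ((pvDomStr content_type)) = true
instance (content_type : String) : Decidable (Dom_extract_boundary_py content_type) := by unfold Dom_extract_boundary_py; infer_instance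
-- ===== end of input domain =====

-- B replaces A's scan-with-early-return by building a first-occurrence-wins dict of ALL
-- Content-Type parameters followed by one 'boundary' lookup (objective: alternative decomposition, same cost).

-- quote-stripping step, verbatim in both Pythons:
-- if len(value) >= 2 and value[0] == '"' and value[-1] == '"': value = value[1:-1]
def pvUnquote (v : List Char) : List Char :=
  if 2 ≤ v.length ∧ PySem.List.pyGet? v 0 = some '"' ∧ PySem.List.pyGet? v (-1) = some '"' then
    PySem.Chars.slice v (some 1) (some (-1))
  else v

-- ===== PORT A =====
-- A's for-loop with early return: part = part.strip(); if part.lower().startswith("boundary="): return unquoted part[9:]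
def pvALoop : List (List Char) → Option (List Char)
  | [] => none
  | p :: rest =>
    if PySem.Chars.startswith (PySem.Chars.lower (PySem.Chars.strip p)) "boundary=".toList = true then
      some (pvUnquote (PySem.Chars.slice (PySem.Chars.strip p) (some 9) none))
    else pvALoop rest

def extract_boundary_py (content_type : String) : Option String :=
  (pvALoop (PySem.Chars.splitOn content_type.toList [';'])).map (fun cs => String.ofList cs)

-- ===== PORT B =====
-- B's dict-building loop: i = part.find('='); skip if i == -1; key = part[:i].lower(); first occurrence wins
def pvBLoop : List (List Char) → PySem.Dict (List Char) (List Char) → PySem.Dict (List Char) (List Char)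
  | [], d => d
  | p :: rest, d =>
    if PySem.Chars.find (PySem.Chars.strip p) ['='] = -1 then pvBLoop rest d
    else
      pvBLoop rest
        (if d.contains (PySem.Chars.lower (PySem.Chars.slice (PySem.Chars.strip p) none (some (PySem.Chars.find (PySem.Chars.strip p) ['='])))) then d
         else d.insert
           (PySem.Chars.lower (PySem.Chars.slice (PySem.Chars.strip p) none (some (PySem.Chars.find (PySem.Chars.strip p) ['=']))))
           (PySem.Chars.slice (PySem.Chars.strip p) (some (PySem.Chars.find (PySem.Chars.strip p) ['='] + 1)) none))

-- value = params.get("boundary"); unquote if present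
def extract_boundary_py_alt (content_type : String) : Option String :=
  ((pvBLoop (PySem.Chars.splitOn content_type.toList [';']) PySem.Dict.empty).get? "boundary".toList).map
    (fun v => String.ofList (pvUnquote v))

-- ===== PRECONDITION & SPEC =====
def Spec_extract_boundary_py (content_type : String) (out : Option String) : Prop := out = extract_boundary_py_alt content_type
instance (content_type : String) (out : Option String) : Decidable (Spec_extract_boundary_py content_type out) := by unfold Spec_extract_boundary_py; infer_instance

-- ===== CLAIM (what is proved, stated in full; the proofs are below) =====
def Claim_equal_extract_boundary_py : Prop := ∀ (content_type : String), Dom_extract_boundary_py content_type → Spec_extract_boundary_py content_type (extract_boundary_py content_type)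

-- ===== LEMMAS AND PROOFS =====

theorem pv_singleton_prefix (a : Char) (l : List Char) : [a] <+: l ↔ l.head? = some a := by
  cases l with
  | nil => simp
  | cons x xs =>
    constructor
    · rintro ⟨t, ht⟩; simp at ht; simp [ht.1]
    · intro h; simp at h; exact ⟨xs, by simp [h]⟩

-- what 'part.find("=") != -1' yields: first occurrence of '=' at the returned index
theorem pv_find_hit (part : List Char) (hf : PySem.Chars.find part ['='] ≠ -1) :
    0 ≤ PySem.Chars.find part ['='] ∧
    part[(PySem.Chars.find part ['=']).toNat]? = some '=' ∧
    ∀ k < (PySem.Chars.find part ['=']).toNat, part[k]? ≠ some '=' := by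
  have h0 : 0 ≤ PySem.Chars.find part ['='] := by
    have := PySem.Chars.neg_one_le_find part ['=']
    omega
  obtain ⟨hpre, hmin⟩ := PySem.Chars.find_spec h0
  rw [pv_singleton_prefix, List.head?_drop] at hpre
  refine ⟨h0, hpre, fun k hk hc => ?_⟩
  exact hmin k hk (by rw [pv_singleton_prefix, List.head?_drop]; exact hc)

theorem pv_find_eq (part : List Char) (n : Nat) (h8 : part[n]? = some '=')
    (hlt : ∀ k < n, part[k]? ≠ some '=') : PySem.Chars.find part ['='] = n := by
  have hf : PySem.Chars.find part ['='] ≠ -1 := by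
    rw [ne_eq, PySem.Chars.find_eq_neg_one_iff]
    intro hni
    obtain ⟨s, t, hst⟩ := List.append_of_mem (l := part) (a := '=') (by
      obtain ⟨h', he⟩ := List.getElem?_eq_some_iff.mp h8
      exact he ▸ List.getElem_mem h')
    exact hni ⟨s, t, by simpa using hst.symm⟩
  obtain ⟨h0, hpre, hmin⟩ := pv_find_hit part hf
  have hjn : (PySem.Chars.find part ['=']).toNat = n := by
    rcases lt_trichotomy (PySem.Chars.find part ['=']).toNat n with h | h | h
    · exact absurd hpre (hlt _ h)
    · exact h
    · exact absurd h8 (hmin n h)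
  omega

theorem pv_lowerChar_eq_eq_iff (c : Char) : PySem.Chars.lowerChar c = '=' ↔ c = '=' := by
  unfold PySem.Chars.lowerChar
  split
  · rename_i h
    unfold PySem.Chars.isupper at h
    simp only [Bool.and_eq_true, decide_eq_true_eq, Char.le_def, UInt32.le_iff_toNat_le] at h
    have hA : ('A' : Char).val.toNat = 65 := by decide
    have hZ : ('Z' : Char).val.toNat = 90 := by decide
    have hc : c.toNat = c.val.toNat := rfl
    constructor
    · intro he
      have h2 : (Char.ofNat (c.toNat + 32)).toNat = ('=' : Char).toNat := by rw [he]
      rw [Char.toNat_ofNat, if_pos (Or.inl (by omega))] at h2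
      have : ('=' : Char).toNat = 61 := by decide
      omega
    · intro he; subst he; exact absurd h (by decide)
  · simp

-- if B's key for a part is "boundary", the first '=' sits at index 8
theorem pv_key8 (part : List Char) (hf : PySem.Chars.find part ['='] ≠ -1)
    (hkey : PySem.Chars.lower (PySem.Chars.slice part none (some (PySem.Chars.find part ['=']))) = "boundary".toList) :
    PySem.Chars.find part ['='] = 8 := by
  obtain ⟨h0, hpre, -⟩ := pv_find_hit part hf
  have hjlen : (PySem.Chars.find part ['=']).toNat < part.length := (List.getElem?_eq_some_iff.mp hpre).1
  rw [PySem.Chars.slice_eq_listSlice, PySem.List.slice_to part h0] at hkey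
  have hl := congrArg List.length hkey
  simp [PySem.Chars.lower] at hl
  omega

-- a part passes A's test iff it has an '=' and B's key for it is "boundary"
theorem pv_match_iff (part : List Char) :
    PySem.Chars.startswith (PySem.Chars.lower part) "boundary=".toList = true ↔
      (PySem.Chars.find part ['='] ≠ -1 ∧
        PySem.Chars.lower (PySem.Chars.slice part none (some (PySem.Chars.find part ['=']))) = "boundary".toList) := by
  have ht8 : ((8 : Int)).toNat = 8 := rfl
  rw [PySem.Chars.startswith_iff]
  constructor
  · rintro ⟨t, ht⟩
    simp only [PySem.Chars.lower] at ht
    have hlen : 9 ≤ part.length := by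
      have := congrArg List.length ht
      simp at this
      omega
    have h8 : part[8]? = some '=' := by
      have h := congrArg (fun l => l[8]?) ht
      simp only [List.getElem?_map] at h
      rw [List.getElem?_append_left (by decide)] at h
      have h9 : ("boundary=".toList)[8]? = some '=' := by decide
      rw [h9] at h
      obtain ⟨c, hc, hlc⟩ := Option.map_eq_some_iff.mp h.symm
      rw [hc, (pv_lowerChar_eq_eq_iff c).mp hlc]
    have hne : ∀ k < 8, part[k]? ≠ some '=' := by
      intro k hk hc
      have h := congrArg (fun l => l[k]?) ht
      simp only [List.getElem?_map] at h
      have hkb : k < ("boundary=".toList).length := by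
        have : ("boundary=".toList).length = 9 := by decide
        omega
      rw [List.getElem?_append_left hkb, hc] at h
      have hle : PySem.Chars.lowerChar '=' = '=' := rfl
      simp only [Option.map_some] at h
      rw [hle] at h
      interval_cases k <;> exact absurd h (by decide)
    have hfind : PySem.Chars.find part ['='] = 8 := pv_find_eq part 8 h8 hne
    refine ⟨by rw [hfind]; norm_num, ?_⟩
    rw [hfind, PySem.Chars.slice_eq_listSlice, PySem.List.slice_to part (by norm_num), ht8]
    simp only [PySem.Chars.lower, List.map_take]
    rw [← ht, List.take_append_of_le_length (by decide)]
    decide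
  · rintro ⟨hf, hkey⟩
    have hfind := pv_key8 part hf hkey
    obtain ⟨h0, hpre, -⟩ := pv_find_hit part hf
    rw [hfind, ht8] at hpre
    rw [hfind, PySem.Chars.slice_eq_listSlice, PySem.List.slice_to part (by norm_num), ht8] at hkey
    have hjlen : (8 : Nat) < part.length := (List.getElem?_eq_some_iff.mp hpre).1
    have hdrop : part.drop 8 = '=' :: part.drop 9 := by
      rw [List.drop_eq_getElem_cons hjlen]
      have h8v : part[8] = '=' := (List.getElem?_eq_some_iff.mp hpre).2
      rw [h8v]
    refine ⟨(part.drop 9).map PySem.Chars.lowerChar, ?_⟩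
    simp only [PySem.Chars.lower]
    conv_rhs => rw [← List.take_append_drop 8 part]
    rw [List.map_append, hdrop]
    simp only [PySem.Chars.lower] at hkey
    rw [hkey]
    have hb : "boundary=".toList = "boundary".toList ++ ['='] := by decide
    have hle : PySem.Chars.lowerChar '=' = '=' := rfl
    rw [hb, List.map_cons, hle]
    simp

-- once 'boundary' is in the dict, the rest of B's loop never changes it (first occurrence wins)
theorem pv_bloop_preserve (parts : List (List Char)) (d : PySem.Dict (List Char) (List Char))
    (v : List Char) (h : d.get? "boundary".toList = some v) :
    (pvBLoop parts d).get? "boundary".toList = some v := by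
  induction parts generalizing d with
  | nil => simpa [pvBLoop]
  | cons p rest ih =>
    simp only [pvBLoop]
    split
    · exact ih d h
    · split
      · exact ih d h
      · rename_i hfind hcon
        apply ih
        by_cases hk : "boundary".toList = PySem.Chars.lower (PySem.Chars.slice (PySem.Chars.strip p) none (some (PySem.Chars.find (PySem.Chars.strip p) ['='])))
        · rw [← hk] at hcon
          rw [PySem.Dict.contains_eq_isSome_get?, h] at hcon
          simp at hcon
        · rw [PySem.Dict.get?_insert_of_ne _ _ hk]
          exact h

-- main loop invariant: while 'boundary' is absent from the dict, A's remaining scan equals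
-- B's remaining dict-fill followed by the lookup (up to the shared unquoting step)
theorem pv_main (parts : List (List Char)) (d : PySem.Dict (List Char) (List Char))
    (h : d.get? "boundary".toList = none) :
    pvALoop parts = ((pvBLoop parts d).get? "boundary".toList).map pvUnquote := by
  induction parts generalizing d with
  | nil => simp only [pvALoop, pvBLoop]; rw [h]; rfl
  | cons p rest ih =>
    simp only [pvALoop, pvBLoop]
    by_cases hm : PySem.Chars.startswith (PySem.Chars.lower (PySem.Chars.strip p)) "boundary=".toList = true
    · rw [if_pos hm]
      obtain ⟨hf, hkey⟩ := (pv_match_iff (PySem.Chars.strip p)).mp hm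
      have hfind := pv_key8 _ hf hkey
      rw [if_neg hf]
      have hcon : (d.contains (PySem.Chars.lower (PySem.Chars.slice (PySem.Chars.strip p) none (some (PySem.Chars.find (PySem.Chars.strip p) ['=']))))) = false := by
        rw [hkey, PySem.Dict.contains_eq_isSome_get?, h]; rfl
      rw [if_neg (by rw [Bool.not_eq_true]; exact hcon)]
      rw [pv_bloop_preserve rest _ _ (by rw [hkey, PySem.Dict.get?_insert_self])]
      rw [hfind]
      norm_num
    · rw [if_neg hm]
      split
      · exact ih d h
      · rename_i hf
        have hk : "boundary".toList ≠ PySem.Chars.lower (PySem.Chars.slice (PySem.Chars.strip p) none (some (PySem.Chars.find (PySem.Chars.strip p) ['=']))) := by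
          intro hkeq
          exact hm ((pv_match_iff (PySem.Chars.strip p)).mpr ⟨hf, hkeq.symm⟩)
        split
        · exact ih d h
        · exact ih _ (by rw [PySem.Dict.get?_insert_of_ne _ _ hk]; exact h)

-- ===== VERDICT (by name: the statement is the Claim_ definition above) =====
theorem extract_boundary_py_spec : Claim_equal_extract_boundary_py := by
  intro ct _
  unfold Spec_extract_boundary_py extract_boundary_py extract_boundary_py_alt
  rw [pv_main _ PySem.Dict.empty (PySem.Dict.get?_empty _)]
  cases (pvBLoop (PySem.Chars.splitOn ct.toList [';']) PySem.Dict.empty).get? "boundary".toList <;> rfl
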